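-- pv_equiv track=rewrite | github.com/Gihan-1994/WBTH | apps/ml/GuidesRecommendationModel/guide_recommender.py | _popularity_score
-- ===== SOURCE A (Python) =====
-- from typing import List, Dict, Optional, Set
--
-- def _popularity_score(prior_bookings: int, candidates: List[Dict]) -> int:
--     """
--     Calculate popularity score based on prior bookings.
--     +1 if above median
--     +2 if top quartile
--     """
--     bookings = [g.get("prior_bookings", 0) for g in candidates]
--
--     if not bookings:
--         return 0
--
--     bookings_sorted = sorted(bookings)
--     median_idx = len(bookings_sorted) // 2
--     q3_idx = int(len(bookings_sorted) * 0.75)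
--
--     median = bookings_sorted[median_idx]
--     q3 = bookings_sorted[q3_idx]
--
--     if prior_bookings >= q3:
--         return 2
--     elif prior_bookings >= median:
--         return 1
--     else:
--         return 0
-- ===== SOURCE B (Python) =====
-- def _popularity_score(prior_bookings, candidates):
--     # One counting pass, no sorting: sorted(b)[k] <= x  iff  more than k elements of b are <= x.
--     n = len(candidates)
--     if n == 0:
--         return 0
--     c = sum(1 for g in candidates if g.get("prior_bookings", 0) <= prior_bookings)
--     if c > 3 * n // 4:
--         return 2
--     if c > n // 2:
--         return 1
--     return 0
-- ===== Notes on version B (the rewrite author's own statement) =====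
-- stated objective: alternative
-- what changed: Instead of sorting the bookings and indexing the median/Q3 order statistics, B makes a single counting pass (sorted[k] <= x iff more than k elements are <= x) and compares the count against the two index thresholds.
import Mathlib
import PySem

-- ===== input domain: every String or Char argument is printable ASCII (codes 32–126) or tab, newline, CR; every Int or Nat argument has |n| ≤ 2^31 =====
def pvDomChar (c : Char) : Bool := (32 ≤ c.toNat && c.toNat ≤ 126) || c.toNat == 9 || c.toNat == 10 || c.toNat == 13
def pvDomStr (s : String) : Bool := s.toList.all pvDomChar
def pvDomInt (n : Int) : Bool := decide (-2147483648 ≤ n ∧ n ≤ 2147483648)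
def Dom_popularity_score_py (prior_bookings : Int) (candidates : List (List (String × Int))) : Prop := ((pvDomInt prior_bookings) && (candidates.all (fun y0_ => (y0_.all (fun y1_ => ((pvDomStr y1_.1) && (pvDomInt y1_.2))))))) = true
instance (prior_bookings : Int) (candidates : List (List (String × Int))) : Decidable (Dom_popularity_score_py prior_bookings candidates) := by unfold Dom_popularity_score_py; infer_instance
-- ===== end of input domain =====

-- B replaces sort-then-index by a single counting pass: sorted[k] ≤ x iff more than k elements are ≤ x, so no sorted list is built.


-- ===== PORT A =====
-- g.get("prior_bookings", 0): first-match association-list lookup (Python dict keys are unique, so exact)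
def pvGetBookings (g : List (String × Int)) : Int :=
  (((g.find? (fun p => p.1 == "prior_bookings")).map Prod.snd).getD 0)

def popularity_score_py (prior_bookings : Int) (candidates : List (List (String × Int))) : Int :=
  let bookings := candidates.map pvGetBookings
  if bookings.isEmpty then 0
  else
    let bs := PySem.List.sorted bookings (fun x => x)
    let medianIdx := bs.length / 2
    -- int(n*0.75) = 3*n // 4 exactly: 0.75 is the dyadic rational 3/4 and n*0.75 is exact for n < 2^53
    let q3Idx := 3 * bs.length / 4
    let median := bs.getD medianIdx 0   -- index always in range: n ≥ 1, medianIdx < n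
    let q3 := bs.getD q3Idx 0           -- index always in range: q3Idx < n
    if q3 ≤ prior_bookings then 2
    else if median ≤ prior_bookings then 1
    else 0

-- ===== PORT B =====
def popularity_score_py_alt (prior_bookings : Int) (candidates : List (List (String × Int))) : Int :=
  let n := candidates.length
  if n = 0 then 0
  else
    let c := candidates.countP (fun g => pvGetBookings g ≤ prior_bookings)
    if 3 * n / 4 < c then 2
    else if n / 2 < c then 1
    else 0

-- ===== PRECONDITION & SPEC =====
def Spec_popularity_score_py (prior_bookings : Int) (candidates : List (List (String × Int))) (out : Int) : Prop := out = popularity_score_py_alt prior_bookings candidates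
instance (prior_bookings : Int) (candidates : List (List (String × Int))) (out : Int) : Decidable (Spec_popularity_score_py prior_bookings candidates out) := by unfold Spec_popularity_score_py; infer_instance

-- ===== CLAIM (what is proved, stated in full; the proofs are below) =====
def Claim_equal_popularity_score_py : Prop := ∀ (prior_bookings : Int) (candidates : List (List (String × Int))), Dom_popularity_score_py prior_bookings candidates → Spec_popularity_score_py prior_bookings candidates (popularity_score_py prior_bookings candidates)

-- ===== LEMMAS AND PROOFS =====

-- In a nondecreasing list, the k-th element is ≤ x iff more than k elements are ≤ x.
theorem sorted_getD_le_iff (x : Int) :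
    ∀ (l : List Int), l.Pairwise (· ≤ ·) → ∀ k, k < l.length →
      (l.getD k 0 ≤ x ↔ k < l.countP (fun b => b ≤ x)) := by
  intro l
  induction l with
  | nil => intro _ k hk; simp at hk
  | cons a t ih =>
    intro hp k hk
    rcases List.pairwise_cons.mp hp with ⟨ha, ht⟩
    cases k with
    | zero =>
      simp only [List.getD_cons_zero, List.countP_cons]
      constructor
      · intro h; simp [h]
      · intro h
        by_contra hax
        simp only [hax, decide_false, Bool.false_eq_true] at h
        rcases List.countP_pos_iff.mp h with ⟨y, hy, hyx⟩
        exact hax (le_trans (ha y hy) (by simpa using hyx))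
    | succ k =>
      simp only [List.getD_cons_succ, List.countP_cons]
      have hk' : k < t.length := by simpa using hk
      by_cases hax : a ≤ x
      · simp only [hax, decide_true, if_pos]
        rw [ih ht k hk']
        omega
      · have hmem : t.getD k 0 ∈ t := by
          rw [List.getD_eq_getElem?_getD, List.getElem?_eq_getElem hk']
          simp [List.getElem_mem]
        have hcount : t.countP (fun b => b ≤ x) = 0 := by
          rw [List.countP_eq_zero]
          intro y hy
          simp only [decide_eq_true_eq]
          intro hyx
          exact hax (le_trans (ha y hy) hyx)
        constructor
        · intro h
          exact absurd (le_trans (ha _ hmem) h) hax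
        · intro h
          rw [hcount] at h
          simp [hax] at h

-- ===== VERDICT (by name: the statement is the Claim_ definition above) =====
theorem popularity_score_py_spec : Claim_equal_popularity_score_py := by
  intro x candidates _
  unfold Spec_popularity_score_py popularity_score_py popularity_score_py_alt
  cases candidates with
  | nil => simp
  | cons g gs =>
    simp only [List.isEmpty_map, List.isEmpty_cons, Bool.false_eq_true, if_false, List.length_cons]
    rw [if_neg (Nat.succ_ne_zero gs.length)]
    set bs := (PySem.List.sorted (List.map pvGetBookings (g :: gs)) fun x => x) with hbs
    have hperm : bs.Perm (List.map pvGetBookings (g :: gs)) := PySem.List.sorted_perm ..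
    have hlen : bs.length = gs.length + 1 := by rw [hperm.length_eq]; simp
    have hpw : bs.Pairwise (· ≤ ·) := by
      have := PySem.List.sorted_pairwise (xs := List.map pvGetBookings (g :: gs))
        (key := fun x => x)
      simpa using this
    have hcnt : bs.countP (fun b => b ≤ x) =
        (g :: gs).countP (fun g => pvGetBookings g ≤ x) := by
      rw [hperm.countP_eq, List.countP_map]
      rfl
    have hq3lt : 3 * bs.length / 4 < bs.length := by omega
    have hmedlt : bs.length / 2 < bs.length := by omega
    have hq3 := sorted_getD_le_iff x bs hpw _ hq3lt
    have hmed := sorted_getD_le_iff x bs hpw _ hmedlt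
    rw [hcnt] at hq3 hmed
    by_cases h2 : 3 * bs.length / 4 < List.countP (fun g => decide (pvGetBookings g ≤ x)) (g :: gs)
    · rw [if_pos (show 3 * (gs.length + 1) / 4 < _ by rw [← hlen]; exact h2),
          if_pos (hq3.mpr h2)]
    · rw [if_neg (show ¬ 3 * (gs.length + 1) / 4 < _ by rw [← hlen]; exact h2),
          if_neg (fun h => h2 (hq3.mp h))]
      by_cases h1 : bs.length / 2 < List.countP (fun g => decide (pvGetBookings g ≤ x)) (g :: gs)
      · rw [if_pos (show (gs.length + 1) / 2 < _ by rw [← hlen]; exact h1),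
            if_pos (hmed.mpr h1)]
      · rw [if_neg (show ¬ (gs.length + 1) / 2 < _ by rw [← hlen]; exact h1),
            if_neg (fun h => h1 (hmed.mp h))]
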